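-- pv_equiv track=rewrite | github.com/HariShankar08/Neural-POS-Tagging | helpers.py | process_sentence
-- ===== SOURCE A (Python) =====
-- def process_sentence(sentence, prev, next_):
--     windows = []
--     targets = []
--     for i in range(len(sentence)):
--         window = []
--         for j in range(1, prev + 1):
--             if i - j < 0:
--                 window.insert(0, '<S>')
--             else:
--                 window.insert(0, sentence[i-j]['form'])
--
--         window.append(sentence[i]['form'])
--
--         for j in range(1, next_ + 1):
--             if i + j >= len(sentence):
--                 window.append('</S>')
--             else:
--                 window.append(sentence[i+j]['form'])
--
--         targets.append(sentence[i]['upos'])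
--
--         windows.append(window)
--     return windows, targets
-- ===== SOURCE B (Python) =====
-- def process_sentence(sentence, prev, next_):
--     p = max(prev, 0)
--     q = max(next_, 0)
--     forms = [tok['form'] for tok in sentence]
--     padded = ['<S>'] * p + forms + ['</S>'] * q
--     size = p + q + 1
--     windows = [padded[i:i + size] for i in range(len(sentence))]
--     targets = [tok['upos'] for tok in sentence]
--     return windows, targets
-- ===== Notes on version B (the rewrite author's own statement) =====
-- stated objective: simpler
-- what changed: Replaces the per-token conditional index loops (with insert(0,...) prepends) by building one padded forms list once and taking a uniform contiguous slice per token.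
import Mathlib
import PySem

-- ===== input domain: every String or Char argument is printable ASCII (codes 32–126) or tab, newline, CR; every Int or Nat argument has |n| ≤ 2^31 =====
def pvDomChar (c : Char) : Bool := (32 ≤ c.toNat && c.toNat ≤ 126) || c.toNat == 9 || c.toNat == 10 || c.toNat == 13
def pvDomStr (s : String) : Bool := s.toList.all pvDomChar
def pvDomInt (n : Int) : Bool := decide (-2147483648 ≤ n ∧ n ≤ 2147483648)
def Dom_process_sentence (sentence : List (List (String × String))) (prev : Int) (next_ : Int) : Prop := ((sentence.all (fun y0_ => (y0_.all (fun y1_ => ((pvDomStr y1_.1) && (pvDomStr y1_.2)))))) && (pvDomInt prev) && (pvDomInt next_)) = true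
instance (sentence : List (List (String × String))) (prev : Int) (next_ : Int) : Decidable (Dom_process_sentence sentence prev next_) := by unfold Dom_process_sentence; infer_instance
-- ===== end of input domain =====

-- B replaces A's per-token conditional index loops by one pre-padded forms list plus a uniform
-- contiguous slice per token (objective: a simpler decomposition; no speed claim).

-- tok['form'] / tok['upos']: first-match lookup; the default "" is only reached outside Pre_
def psGet (tok : List (String × String)) (k : String) : String :=
  (List.lookup k tok).getD ""

-- ===== PORT A =====
def process_sentence (sentence : List (List (String × String))) (prev : Int) (next_ : Int) : List (List String) × List String :=
  let n : Int := sentence.length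
  (PySem.List.pyRange 0 n 1).foldl
    (fun acc i =>
      let w1 := (PySem.List.pyRange 1 (prev + 1) 1).foldl
        (fun w j => (if i - j < 0 then "<S>" else psGet (PySem.List.pyGetD sentence (i - j) []) "form") :: w) []
      let w2 := w1 ++ [psGet (PySem.List.pyGetD sentence i []) "form"]
      let w3 := (PySem.List.pyRange 1 (next_ + 1) 1).foldl
        (fun w j => w ++ [if n ≤ i + j then "</S>" else psGet (PySem.List.pyGetD sentence (i + j) []) "form"]) w2
      (acc.1 ++ [w3], acc.2 ++ [psGet (PySem.List.pyGetD sentence i []) "upos"]))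
    ([], [])

-- ===== PORT B =====
def process_sentence_alt (sentence : List (List (String × String))) (prev : Int) (next_ : Int) : List (List String) × List String :=
  let p := prev.toNat          -- max(prev, 0)
  let q := next_.toNat         -- max(next_, 0)
  let forms := sentence.map (fun tok => psGet tok "form")
  let padded := List.replicate p "<S>" ++ forms ++ List.replicate q "</S>"
  let size := p + q + 1
  let windows := (List.range sentence.length).map
    (fun (i : Nat) => PySem.List.slice padded (some (i : Int)) (some ((i : Int) + (size : Int))))
  let targets := sentence.map (fun tok => psGet tok "upos")
  (windows, targets)

-- ===== PRECONDITION & SPEC =====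
-- Pre_ excludes exactly the inputs on which A raises KeyError: a token without a 'form' or 'upos' key.
def Pre_process_sentence (sentence : List (List (String × String))) (prev : Int) (next_ : Int) : Prop :=
  ∀ tok ∈ sentence, (List.lookup "form" tok).isSome = true ∧ (List.lookup "upos" tok).isSome = true
instance (sentence : List (List (String × String))) (prev : Int) (next_ : Int) : Decidable (Pre_process_sentence sentence prev next_) := by unfold Pre_process_sentence; infer_instance

def pvWitness_process_sentence : (List (List (String × String))) × Int × Int :=
  ([[("form", "dog"), ("upos", "NOUN")], [("form", "runs"), ("upos", "VERB")]], 2, 1)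

def Spec_process_sentence (sentence : List (List (String × String))) (prev : Int) (next_ : Int) (out : List (List String) × List String) : Prop := out = process_sentence_alt sentence prev next_
instance (sentence : List (List (String × String))) (prev : Int) (next_ : Int) (out : List (List String) × List String) : Decidable (Spec_process_sentence sentence prev next_ out) := by unfold Spec_process_sentence; infer_instance

-- ===== CLAIM (what is proved, stated in full; the proofs are below) =====
def Claim_equal_process_sentence : Prop := ∀ (sentence : List (List (String × String))) (prev : Int) (next_ : Int), Dom_process_sentence sentence prev next_ → Pre_process_sentence sentence prev next_ → Spec_process_sentence sentence prev next_ (process_sentence sentence prev next_)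

-- ===== LEMMAS AND PROOFS =====

-- a 'window.insert(0, g(j))' loop builds the reversed map
theorem foldl_cons_rev {α β : Type} (l : List α) (g : α → β) (w0 : List β) :
    l.foldl (fun w j => g j :: w) w0 = (l.map g).reverse ++ w0 := by
  induction l generalizing w0 with
  | nil => simp
  | cons x xs ih => simp [ih]

-- mapping f over the elements fetched by index over the whole range is mapping f over the list
theorem map_pyRange_psGet {β : Type} (xs : List (List (String × String))) (f : List (String × String) → β) :
    (PySem.List.pyRange 0 (xs.length : Int) 1).map (fun i => f (PySem.List.pyGetD xs i [])) = xs.map f := by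
  have h : (PySem.List.pyRange 0 (xs.length : Int) 1).map (fun i => PySem.List.pyGetD xs i ([] : List (String × String))) = xs :=
    PySem.List.map_pyGetD_pyRange_zero xs []
  calc (PySem.List.pyRange 0 (xs.length : Int) 1).map (fun i => f (PySem.List.pyGetD xs i []))
      = ((PySem.List.pyRange 0 (xs.length : Int) 1).map (fun i => PySem.List.pyGetD xs i [])).map f := by
        rw [List.map_map]; rfl
    _ = xs.map f := by rw [h]

-- A's window at position i equals B's slice of the padded forms list
theorem window_eq (s : List (List (String × String))) (prev next_ : Int) (i : Nat) (hi : i < s.length) :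
    (PySem.List.pyRange 1 (next_ + 1) 1).foldl
        (fun w j => w ++ [if ((s.length : Int)) ≤ (i : Int) + j then "</S>" else psGet (PySem.List.pyGetD s ((i : Int) + j) []) "form"])
        ((PySem.List.pyRange 1 (prev + 1) 1).foldl
            (fun w j => (if (i : Int) - j < 0 then "<S>" else psGet (PySem.List.pyGetD s ((i : Int) - j) []) "form") :: w) []
          ++ [psGet (PySem.List.pyGetD s (i : Int) []) "form"])
    = PySem.List.slice
        (List.replicate prev.toNat "<S>" ++ s.map (fun tok => psGet tok "form") ++ List.replicate next_.toNat "</S>")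
        (some (i : Int)) (some ((i : Int) + ((prev.toNat + next_.toNat + 1 : Nat) : Int))) := by
  rw [PySem.List.foldl_append_singleton_eq_map, foldl_cons_rev, List.append_nil,
    PySem.List.slice_natCast_add]
  apply List.ext_getElem
  · simp [PySem.List.length_pyRange_one]
    omega
  · intro t h1 h2
    simp only [List.getElem_append, List.getElem_reverse, List.getElem_map, List.getElem_take,
      List.getElem_drop, List.getElem_replicate, List.getElem_singleton,
      PySem.List.getElem_pyRange_one, List.length_reverse, List.length_map,
      PySem.List.length_pyRange_one, List.length_append, List.length_replicate, List.length_cons, List.length_nil]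
    split_ifs
    all_goals first
      | rfl
      | (exfalso; omega)
      | (rw [PySem.List.pyGetD_eq_getElem _ _ (by omega) (by omega)]; congr 2 <;> omega)

-- ===== VERDICT (by name: the statement is the Claim_ definition above) =====
theorem process_sentence_spec : Claim_equal_process_sentence := by
  intro s prev next_ _hdom _hpre
  unfold Spec_process_sentence
  show process_sentence s prev next_ = process_sentence_alt s prev next_
  simp only [process_sentence, process_sentence_alt]
  rw [PySem.List.foldl_prod_mk
    (f := fun (x : List (List String)) (i : Int) => x ++
      [List.foldl
        (fun w j => w ++ [if (s.length : Int) ≤ i + j then "</S>" else psGet (PySem.List.pyGetD s (i + j) []) "form"])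
        (List.foldl
          (fun w j => (if i - j < 0 then "<S>" else psGet (PySem.List.pyGetD s (i - j) []) "form") :: w) []
          (PySem.List.pyRange 1 (prev + 1) 1) ++
          [psGet (PySem.List.pyGetD s i []) "form"])
        (PySem.List.pyRange 1 (next_ + 1) 1)])
    (g := fun (x : List String) (i : Int) => x ++ [psGet (PySem.List.pyGetD s i []) "upos"])]
  refine Prod.ext ?_ ?_
  · rw [PySem.List.foldl_append_singleton_eq_map, List.nil_append,
      PySem.List.pyRange_zero_natCast, List.map_map]
    apply List.map_congr_left
    intro k hk
    simp only [Function.comp]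
    exact window_eq s prev next_ k (List.mem_range.mp hk)
  · show List.foldl (fun x i => x ++ [psGet (PySem.List.pyGetD s i []) "upos"]) []
        (PySem.List.pyRange 0 (s.length : Int) 1) = List.map (fun tok => psGet tok "upos") s
    rw [PySem.List.foldl_append_singleton_eq_map, List.nil_append]
    exact map_pyRange_psGet s (fun tok => psGet tok "upos")
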